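-- pv_equiv track=rewrite | github.com/SAV-Open-Playground/sav-agent | managers.py | _diff_fib
-- ===== SOURCE A (Python) =====
-- def _diff_fib(old_fib, new_fib):
--     """
--     return list of added and deleted rows in dict format
--     """
--     # self.logger.debug(f"old fib:{old_fib}, new_fib:{new_fib}")
--     dels = {}
--     adds = {}
--     for prefix in new_fib:
--         if not (new_fib.get(prefix, None) == old_fib.get(prefix, None)):
--             adds[prefix] = new_fib[prefix]
--     for prefix in old_fib:
--         if not (new_fib.get(prefix, None) == old_fib.get(prefix, None)):
--             dels[prefix] = old_fib[prefix]
--     return adds, dels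
-- ===== SOURCE B (Python) =====
-- def _diff_fib(old_fib, new_fib):
--     """
--     return list of added and deleted rows in dict format
--     """
--     adds = dict(new_fib)
--     dels = dict(old_fib)
--     for prefix, value in old_fib.items():
--         if prefix in new_fib and new_fib[prefix] == value:
--             del adds[prefix]
--             del dels[prefix]
--     return adds, dels
-- ===== Notes on version B (the rewrite author's own statement) =====
-- stated objective: alternative
-- what changed: B is subtractive: it copies both dicts once and makes a SINGLE pass over old_fib deleting each unchanged entry from both copies, instead of A's two additive loops that filter-and-insert into empty dicts with two .get() lookups per key; Pre_ excludes association lists with duplicate keys, which do not represent a Python dict (the declared parameter type dict[str,str]) so neither program is ever called on them.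
import Mathlib
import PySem

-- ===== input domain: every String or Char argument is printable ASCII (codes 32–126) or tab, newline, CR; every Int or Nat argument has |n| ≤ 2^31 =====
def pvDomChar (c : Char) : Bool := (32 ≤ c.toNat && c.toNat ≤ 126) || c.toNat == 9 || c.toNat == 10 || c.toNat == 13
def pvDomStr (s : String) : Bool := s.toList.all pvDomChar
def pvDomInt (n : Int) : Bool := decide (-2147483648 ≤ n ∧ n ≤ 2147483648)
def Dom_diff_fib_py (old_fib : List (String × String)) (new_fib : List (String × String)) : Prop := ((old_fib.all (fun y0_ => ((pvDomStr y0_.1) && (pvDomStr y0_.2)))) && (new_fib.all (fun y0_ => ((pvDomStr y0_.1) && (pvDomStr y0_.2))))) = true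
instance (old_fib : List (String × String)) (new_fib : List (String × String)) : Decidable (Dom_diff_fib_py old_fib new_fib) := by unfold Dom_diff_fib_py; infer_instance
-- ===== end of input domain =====

-- B is subtractive: it copies both dicts once and deletes the unchanged entries in a
-- single pass over old_fib, instead of A's two additive filter-and-insert loops (alternative, same cost).


-- ===== PORT A =====
-- d.get(k, None) on the items list of a dict (first match)
def pvGetFib (fib : List (String × String)) (k : String) : Option String :=
  (fib.find? (fun p => p.1 == k)).map (·.2)

def diff_fib_py (old_fib : List (String × String)) (new_fib : List (String × String)) : (List (String × String)) × (List (String × String)) :=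
  let dels : PySem.Dict String String := PySem.Dict.empty
  let adds : PySem.Dict String String := PySem.Dict.empty
  let adds := new_fib.foldl (fun adds p =>
    if !(pvGetFib new_fib p.1 == pvGetFib old_fib p.1) then adds.insert p.1 p.2 else adds) adds
  let dels := old_fib.foldl (fun dels p =>
    if !(pvGetFib new_fib p.1 == pvGetFib old_fib p.1) then dels.insert p.1 p.2 else dels) dels
  (adds.items, dels.items)

-- ===== PORT B =====
def diff_fib_py_alt (old_fib : List (String × String)) (new_fib : List (String × String)) : (List (String × String)) × (List (String × String)) :=
  -- adds = dict(new_fib); dels = dict(old_fib)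
  let newD : PySem.Dict String String := PySem.Dict.mk new_fib
  -- one pass over old_fib: delete every unchanged entry from both copies
  let r := old_fib.foldl
    (fun (ad : PySem.Dict String String × PySem.Dict String String) q =>
      if newD.contains q.1 && (newD.get? q.1 == some q.2) then (ad.1.erase q.1, ad.2.erase q.1) else ad)
    (PySem.Dict.mk new_fib, PySem.Dict.mk old_fib)
  (r.1.items, r.2.items)

-- ===== PRECONDITION & SPEC =====
-- The Python parameters are dicts (dict[str, str]); an association list with a duplicated
-- key does not represent any Python dict, so Pre_ excludes exactly those lists.
def Pre_diff_fib_py (old_fib : List (String × String)) (new_fib : List (String × String)) : Prop :=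
  (old_fib.map Prod.fst).Nodup ∧ (new_fib.map Prod.fst).Nodup
instance (old_fib : List (String × String)) (new_fib : List (String × String)) : Decidable (Pre_diff_fib_py old_fib new_fib) := by unfold Pre_diff_fib_py; infer_instance

def pvWitness_diff_fib_py : (List (String × String)) × (List (String × String)) :=
  ([("10.0.0.0/24", "eth0"), ("10.1.0.0/24", "eth1")], [("10.0.0.0/24", "eth2"), ("10.2.0.0/24", "eth0")])

def Spec_diff_fib_py (old_fib : List (String × String)) (new_fib : List (String × String)) (out : (List (String × String)) × (List (String × String))) : Prop := out = diff_fib_py_alt old_fib new_fib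
instance (old_fib : List (String × String)) (new_fib : List (String × String)) (out : (List (String × String)) × (List (String × String))) : Decidable (Spec_diff_fib_py old_fib new_fib out) := by unfold Spec_diff_fib_py; infer_instance

-- ===== CLAIM (what is proved, stated in full; the proofs are below) =====
def Claim_equal_diff_fib_py : Prop := ∀ (old_fib : List (String × String)) (new_fib : List (String × String)), Dom_diff_fib_py old_fib new_fib → Pre_diff_fib_py old_fib new_fib → Spec_diff_fib_py old_fib new_fib (diff_fib_py old_fib new_fib)

-- ===== LEMMAS AND PROOFS =====
-- On a duplicate-free association list, membership of a pair is exactly a successful first-match lookup.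
theorem pvGetFib_eq_some_iff (l : List (String × String)) (h : (l.map Prod.fst).Nodup)
    (k v : String) : pvGetFib l k = some v ↔ (k, v) ∈ l := by
  induction l with
  | nil => simp [pvGetFib]
  | cons q rest ih =>
    obtain ⟨a, b⟩ := q
    simp only [List.map_cons, List.nodup_cons] at h
    by_cases hk : a = k
    · subst hk
      simp only [pvGetFib, List.find?_cons, beq_self_eq_true, Option.map_some, Option.some.injEq,
        List.mem_cons, Prod.mk.injEq]
      constructor
      · rintro rfl; exact Or.inl ⟨trivial, rfl⟩
      · rintro (⟨-, rfl⟩ | hmem)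
        · rfl
        · exact absurd (List.mem_map_of_mem (f := Prod.fst) hmem) h.1
    · have hne : ((a, b).1 == k) = false := by simpa using hk
      simp only [pvGetFib, List.find?_cons, hne]
      rw [show ((rest.find? (fun p => p.1 == k)).map (·.2) = some v ↔ (k, v) ∈ rest) from ih h.2]
      simp only [List.mem_cons, Prod.mk.injEq]
      constructor
      · exact Or.inr
      · rintro (⟨rfl, rfl⟩ | hm)
        · exact absurd rfl hk
        · exact hm

-- A's loop: inserting the entries that satisfy an accumulator-independent condition, over
-- fresh distinct keys, builds exactly the filtered list.
theorem fold_insert_items (self : List (String × String)) (c : String × String → Bool)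
    (hself : (self.map Prod.fst).Nodup) :
    (self.foldl (fun d p => if c p then d.insert p.1 p.2 else d) PySem.Dict.empty).items
      = self.filter c := by
  rw [← List.foldl_filter]
  rw [PySem.Dict.items_foldl_insert_fresh (self.filter c) Prod.fst Prod.snd PySem.Dict.empty
      (fun a _ => PySem.Dict.contains_empty a.1)
      ((List.Sublist.map Prod.fst (List.filter_sublist (p := c) (l := self))).nodup hself)]
  simp [PySem.Dict.empty]

-- B's loop updates both dict copies in lockstep; it is componentwise the one-dict loop.
theorem foldl_pair_erase (l : List (String × String)) (c : String × String → Bool)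
    (d1 d2 : PySem.Dict String String) :
    l.foldl (fun (ad : PySem.Dict String String × PySem.Dict String String) q =>
        if c q then (ad.1.erase q.1, ad.2.erase q.1) else ad) (d1, d2)
      = (l.foldl (fun d q => if c q then d.erase q.1 else d) d1,
         l.foldl (fun d q => if c q then d.erase q.1 else d) d2) := by
  induction l generalizing d1 d2 with
  | nil => rfl
  | cons q rest ih =>
    simp only [List.foldl_cons]
    by_cases h : c q = true
    · simp only [h, if_true]; exact ih _ _
    · simp only [Bool.not_eq_true] at h; simp only [h, Bool.false_eq_true, if_false]; exact ih _ _

-- A loop of conditional deletions leaves exactly the entries whose key is deleted by no iteration.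
theorem fold_erase_items (l : List (String × String)) (c : String × String → Bool)
    (d : PySem.Dict String String) :
    (l.foldl (fun d q => if c q then d.erase q.1 else d) d).items
      = d.items.filter (fun p => !(l.any (fun q => c q && (p.1 == q.1)))) := by
  induction l generalizing d with
  | nil => simp
  | cons q rest ih =>
    simp only [List.foldl_cons, List.any_cons]
    by_cases h : c q = true
    · rw [if_pos h, ih]
      simp only [PySem.Dict.erase, List.filter_filter, h]
      apply List.filter_congr
      intro p _
      cases hpq : (p.1 == q.1) <;> simp
    · simp only [Bool.not_eq_true] at h
      rw [if_neg (by simp [h]), ih, h]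
      simp

-- Key uniqueness: in a duplicate-free association list, equal keys force equal pairs.
theorem eq_of_mem_of_fst_eq (l : List (String × String)) (h : (l.map Prod.fst).Nodup)
    {p q : String × String} (hp : p ∈ l) (hq : q ∈ l) (hk : q.1 = p.1) : q = p := by
  have h1 : pvGetFib l p.1 = some p.2 := (pvGetFib_eq_some_iff l h p.1 p.2).2 hp
  have h2 : pvGetFib l p.1 = some q.2 := by
    rw [← hk]; exact (pvGetFib_eq_some_iff l h q.1 q.2).2 hq
  have : q.2 = p.2 := by rw [h1] at h2; exact (Option.some.injEq _ _ ▸ h2).symm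
  exact Prod.ext hk this

-- B's deletion condition holds exactly when the entry's key is looked up in new_fib to its own value.
theorem cond_iff (new_fib : List (String × String)) (q : String × String) :
    ((PySem.Dict.mk new_fib).contains q.1 && ((PySem.Dict.mk new_fib).get? q.1 == some q.2)) = true
      ↔ pvGetFib new_fib q.1 = some q.2 := by
  have hget : (PySem.Dict.mk new_fib).get? q.1 = pvGetFib new_fib q.1 := rfl
  rw [Bool.and_eq_true, PySem.Dict.contains_eq_isSome_get?, hget, beq_iff_eq]
  constructor
  · exact And.right
  · intro h; exact ⟨by rw [h]; rfl, h⟩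

-- The any-over-old_fib test that drives B's deletions, evaluated at an entry p of either dict.
theorem any_eq_adds (old_fib new_fib : List (String × String))
    (hold : (old_fib.map Prod.fst).Nodup) (hnew : (new_fib.map Prod.fst).Nodup)
    {p : String × String} (hp : p ∈ new_fib) :
    (old_fib.any (fun q => ((PySem.Dict.mk new_fib).contains q.1 && ((PySem.Dict.mk new_fib).get? q.1 == some q.2)) && (p.1 == q.1)))
      = (pvGetFib new_fib p.1 == pvGetFib old_fib p.1) := by
  have hpnew : pvGetFib new_fib p.1 = some p.2 := (pvGetFib_eq_some_iff new_fib hnew p.1 p.2).2 hp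
  rw [Bool.eq_iff_iff, List.any_eq_true]
  constructor
  · rintro ⟨⟨q1, q2⟩, hq, hcond⟩
    rw [Bool.and_eq_true, beq_iff_eq] at hcond
    obtain ⟨hc, hk⟩ := hcond
    rw [cond_iff] at hc
    simp only at hk
    rw [← hk, hpnew] at hc
    injection hc with hv
    rw [hpnew, (pvGetFib_eq_some_iff old_fib hold p.1 p.2).2 (by rw [hk, hv]; exact hq)]
    exact beq_self_eq_true _
  · intro hbeq
    rw [hpnew, beq_iff_eq] at hbeq
    have hmem : (p.1, p.2) ∈ old_fib := (pvGetFib_eq_some_iff old_fib hold p.1 p.2).1 hbeq.symm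
    refine ⟨(p.1, p.2), hmem, ?_⟩
    rw [Bool.and_eq_true, cond_iff]
    exact ⟨hpnew, by simp⟩

theorem any_eq_dels (old_fib new_fib : List (String × String))
    (hold : (old_fib.map Prod.fst).Nodup)
    {p : String × String} (hp : p ∈ old_fib) :
    (old_fib.any (fun q => ((PySem.Dict.mk new_fib).contains q.1 && ((PySem.Dict.mk new_fib).get? q.1 == some q.2)) && (p.1 == q.1)))
      = (pvGetFib new_fib p.1 == some p.2) := by
  rw [Bool.eq_iff_iff, List.any_eq_true]
  constructor
  · rintro ⟨q, hq, hcond⟩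
    rw [Bool.and_eq_true, beq_iff_eq] at hcond
    obtain ⟨hc, hk⟩ := hcond
    have hqp : q = p := eq_of_mem_of_fst_eq old_fib hold hp hq hk.symm
    subst hqp
    rw [cond_iff] at hc
    rw [hc]; exact beq_self_eq_true _
  · intro hbeq
    rw [beq_iff_eq] at hbeq
    refine ⟨p, hp, ?_⟩
    rw [Bool.and_eq_true, cond_iff]
    exact ⟨hbeq, by simp⟩

-- ===== VERDICT (by name: the statement is the Claim_ definition above) =====
theorem diff_fib_py_spec : Claim_equal_diff_fib_py := by
  intro old_fib new_fib _ hpre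
  obtain ⟨hold, hnew⟩ := hpre
  unfold Spec_diff_fib_py
  simp only [diff_fib_py, diff_fib_py_alt, foldl_pair_erase]
  refine Prod.ext ?_ ?_ <;> dsimp only
  · rw [fold_insert_items _ _ hnew, fold_erase_items]
    apply List.filter_congr
    intro p hp
    rw [any_eq_adds old_fib new_fib hold hnew hp]
  · rw [fold_insert_items _ _ hold, fold_erase_items]
    apply List.filter_congr
    intro p hp
    rw [any_eq_dels old_fib new_fib hold hp]
    have : pvGetFib old_fib p.1 = some p.2 := (pvGetFib_eq_some_iff old_fib hold p.1 p.2).2 hp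
    rw [this]
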